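-- pv_equiv track=rewrite | github.com/WinguMD/PlayUpgradeAssistant | modules/TemplateFixer.py | add_implicit_messages
-- ===== SOURCE A (Python) =====
-- from typing import List
--
-- def add_implicit_messages(lines: List[str]) -> List[str]:
--     i = 0
--     done = False
--     res = []
--     for line in lines:
--         i = i + 1
--         if not done and i < 10 and line.find("@(") >= 0 and line.find(
--                 "(implicit messages: play.api.i18n.Messages)") < 0:
--             l2 = line.replace("\n", "") + "(implicit messages: play.api.i18n.Messages)\n"
--             res.append(l2)
--             done = True
--         else:
--             res.append(line)
--     return res
-- ===== SOURCE B (Python) =====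
-- from typing import List
--
-- IMPL = "(implicit messages: play.api.i18n.Messages)"
--
-- def _go(head: List[str]) -> List[str]:
--     # recursive: patch the first qualifying line, keep the remainder untouched
--     if not head:
--         return []
--     first, rest = head[0], head[1:]
--     if "@(" in first and IMPL not in first:
--         return [first.replace("\n", "") + IMPL + "\n"] + rest
--     return [first] + _go(rest)
--
-- def add_implicit_messages(lines: List[str]) -> List[str]:
--     # only the first nine lines are eligible; the tail passes through verbatim
--     return _go(lines[:9]) + lines[9:]
-- ===== Notes on version B (the rewrite author's own statement) =====
-- stated objective: simpler
-- what changed: Replaces A's streaming loop with counter and done-flag over the whole list by slicing off the eligible prefix lines[:9], patching it with a short structural recursion that stops at the first qualifying line, and concatenating the untouched tail back on.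
import Mathlib
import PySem

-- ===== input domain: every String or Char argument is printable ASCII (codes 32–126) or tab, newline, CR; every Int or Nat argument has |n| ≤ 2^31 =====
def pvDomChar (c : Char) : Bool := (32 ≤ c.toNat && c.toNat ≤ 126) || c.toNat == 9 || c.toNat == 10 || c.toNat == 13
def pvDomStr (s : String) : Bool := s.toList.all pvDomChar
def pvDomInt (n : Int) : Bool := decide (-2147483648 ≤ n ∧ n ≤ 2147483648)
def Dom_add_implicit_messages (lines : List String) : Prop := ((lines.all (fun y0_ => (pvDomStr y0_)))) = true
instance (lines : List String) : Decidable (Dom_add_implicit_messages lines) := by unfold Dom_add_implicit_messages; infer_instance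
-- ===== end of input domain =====

-- B replaces A's streaming counter/done-flag pass over the whole list by slicing off the eligible
-- prefix lines[:9], patching it with a structural recursion that stops at the first qualifying line,
-- and concatenating the untouched tail; objective: simpler.

-- ===== PORT A =====
-- A's for-loop with state (i, done), appending to res; ported as the obvious structural recursion over the same state.
def pvAImpl : String := "(implicit messages: play.api.i18n.Messages)"

def pvALoop (lines : List String) (i : Int) (done : Bool) : List String :=
  match lines with
  | [] => []
  | line :: rest =>
    let i := i + 1
    if !done && decide (i < 10) && decide (PySem.Str.find line "@(" ≥ 0)
        && decide (PySem.Str.find line pvAImpl < 0) then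
      let l2 := PySem.Str.replace line "\n" "" ++ pvAImpl ++ "\n"
      l2 :: pvALoop rest i true
    else
      line :: pvALoop rest i done

def add_implicit_messages (lines : List String) : List String :=
  pvALoop lines 0 false

-- ===== PORT B =====
-- B's recursive helper _go over the sliced prefix: patch the first qualifying line, keep the rest.
def pvGo (head : List String) : List String :=
  match head with
  | [] => []
  | first :: rest =>
    if PySem.Str.isIn "@(" first && !(PySem.Str.isIn pvAImpl first) then
      (PySem.Str.replace first "\n" "" ++ pvAImpl ++ "\n") :: rest
    else
      first :: pvGo rest

def add_implicit_messages_alt (lines : List String) : List String :=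
  pvGo (PySem.List.slice lines none (some 9)) ++ PySem.List.slice lines (some 9) none

-- ===== PRECONDITION & SPEC =====
def Spec_add_implicit_messages (lines : List String) (out : List String) : Prop := out = add_implicit_messages_alt lines
instance (lines : List String) (out : List String) : Decidable (Spec_add_implicit_messages lines out) := by unfold Spec_add_implicit_messages; infer_instance

-- ===== CLAIM (what is proved, stated in full; the proofs are below) =====
def Claim_equal_add_implicit_messages : Prop := ∀ (lines : List String), Dom_add_implicit_messages lines → Spec_add_implicit_messages lines (add_implicit_messages lines)

-- ===== LEMMAS AND PROOFS =====

-- A's find ≥ 0 test is B's `in` test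
theorem pvFind_nonneg_eq_isIn (l s : String) :
    decide (0 ≤ PySem.Str.find l s) = PySem.Str.isIn s l := by
  cases h : PySem.Str.isIn s l
  · rw [← Bool.not_eq_true, PySem.Str.isIn_iff_infix] at h
    have h' : PySem.Chars.find l.toList s.toList = -1 :=
      (PySem.Chars.find_eq_neg_one_iff _ _).mpr h
    simp
    omega
  · rw [PySem.Str.isIn_iff_infix] at h
    have h' := (PySem.Chars.find_nonneg_iff l.toList s.toList).mpr h
    simp
    exact h'

-- A's find < 0 test is B's `not in` test
theorem pvFind_neg_eq_not_isIn (l s : String) :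
    decide (PySem.Str.find l s < 0) = !PySem.Str.isIn s l := by
  rw [← pvFind_nonneg_eq_isIn, ← decide_not]
  exact decide_eq_decide.mpr (by omega)

-- A's and B's per-line conditions agree (find ≥ 0 vs `in`).
theorem pvCond_eq (l : String) :
    (decide (PySem.Str.find l "@(" ≥ 0) && decide (PySem.Str.find l pvAImpl < 0))
      = (PySem.Str.isIn "@(" l && !(PySem.Str.isIn pvAImpl l)) := by
  simp only [ge_iff_le, pvFind_nonneg_eq_isIn, pvFind_neg_eq_not_isIn]

-- once done, A's loop copies the remainder unchanged
theorem pvALoop_done (lines : List String) (i : Int) : pvALoop lines i true = lines := by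
  induction lines generalizing i with
  | nil => rfl
  | cons l rest ih => simp [pvALoop, ih]

-- once the counter reaches 9, A's loop copies the remainder unchanged
theorem pvALoop_late (lines : List String) (i : Int) (h : 9 ≤ i) :
    pvALoop lines i false = lines := by
  induction lines generalizing i with
  | nil => rfl
  | cons l rest ih =>
    have : ¬ (i + 1 < 10) := by omega
    simp [pvALoop, this, ih (i + 1) (by omega)]

theorem pvMain (lines : List String) (k : Nat) (hk : k ≤ 9) :
    pvALoop lines (k : Int) false = pvGo (lines.take (9 - k)) ++ lines.drop (9 - k) := by
  induction lines generalizing k with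
  | nil => simp [pvALoop, pvGo]
  | cons l rest ih =>
    by_cases h9 : k = 9
    · subst h9
      simp [pvALoop_late (l :: rest) 9 (by omega), pvGo]
    · have hlt : k < 9 := by omega
      have htake : (l :: rest).take (9 - k) = l :: rest.take (8 - k) := by
        have : 9 - k = (8 - k) + 1 := by omega
        simp [this]
      have hdrop : (l :: rest).drop (9 - k) = rest.drop (8 - k) := by
        have : 9 - k = (8 - k) + 1 := by omega
        simp [this]
      have h10 : ((k : Int) + 1 < 10) := by omega
      rw [htake, hdrop]
      by_cases hc : (PySem.Str.isIn "@(" l && !(PySem.Str.isIn pvAImpl l)) = true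
      · simp only [pvALoop, pvGo, h10, decide_true, Bool.not_false, Bool.true_and,
          pvCond_eq, hc, if_pos]
        simp [pvALoop_done]
      · have := ih (k + 1) (by omega)
        push_cast at this
        simp only [pvALoop, pvGo, h10, decide_true, Bool.not_false, Bool.true_and,
          pvCond_eq, hc, if_neg, Bool.false_eq_true, not_false_eq_true]
        rw [this]
        simp

-- ===== VERDICT (by name: the statement is the Claim_ definition above) =====
theorem add_implicit_messages_spec : Claim_equal_add_implicit_messages := by
  intro lines _
  unfold Spec_add_implicit_messages add_implicit_messages add_implicit_messages_alt
  have h := pvMain lines 0 (by omega)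
  rw [PySem.List.slice_to lines (by omega), PySem.List.slice_from lines (by omega)]
  simpa using h
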